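-- pv_equiv track=rewrite | github.com/pmhxhsj/Algorithm | programmers/더맵게.py | solution
-- ===== SOURCE A (Python) =====
-- import heapq
--
-- def solution(scoville, K):
--     count = 0
--     heapq.heapify(scoville)
--
--     while scoville[0] < K:
--         mixScoville = heapq.heappop(scoville) + (heapq.heappop(scoville) * 2)
--         heapq.heappush(scoville, mixScoville)
--
--         count+=1
--
--         if len(scoville) == 1 and scoville[0] < K:
--             return -1
--
--     return count
-- ===== SOURCE B (Python) =====
-- def solution(scoville, K):
--     # Sorted-list strategy: sort once, then repeatedly merge the two smallest
--     # (taken from the front) and reinsert the mix at its sorted position.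
--     # Mutates the argument in place (as A does); equivalence is about the return value.
--     scoville.sort()
--     count = 0
--     while len(scoville) > 1 and scoville[0] < K:
--         a = scoville.pop(0)
--         b = scoville.pop(0)
--         mixed = a + b * 2
--         i = 0
--         while i < len(scoville) and scoville[i] <= mixed:
--             i += 1
--         scoville.insert(i, mixed)
--         count += 1
--     return count if scoville[0] >= K else -1
-- ===== Notes on version B (the rewrite author's own statement) =====
-- stated objective: alternative
-- what changed: Replaces the binary heap with a list sorted once up front: pop the two smallest from the front, reinsert the mix at its sorted position by a linear scan, guard the loop with len>1 and decide count/-1 by one final check instead of A's in-loop test.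
import Mathlib
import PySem

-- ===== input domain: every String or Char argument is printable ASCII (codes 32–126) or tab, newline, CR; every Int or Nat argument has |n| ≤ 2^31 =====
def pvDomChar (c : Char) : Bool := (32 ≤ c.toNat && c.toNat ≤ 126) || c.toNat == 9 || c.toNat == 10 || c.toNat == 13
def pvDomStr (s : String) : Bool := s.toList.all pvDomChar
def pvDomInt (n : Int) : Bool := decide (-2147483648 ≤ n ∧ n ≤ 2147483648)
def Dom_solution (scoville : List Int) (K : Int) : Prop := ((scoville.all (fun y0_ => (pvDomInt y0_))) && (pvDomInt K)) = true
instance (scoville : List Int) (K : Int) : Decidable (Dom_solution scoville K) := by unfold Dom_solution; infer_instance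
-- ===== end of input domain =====

-- B replaces A's heap with a list sorted once up front, maintained by front pops and a scan-insert
-- (alternative data structure, not faster); both Pythons mutate the argument in place — the
-- equivalence proved is about the RETURN value only.


-- ===== PORT A =====
-- heapq is modeled by the multiset of heap elements: after heapify, scoville[0] reads the minimum
-- and heappop removes (one occurrence of) it.  This is exact for the RETURN value on Int elements,
-- since heap order among equal values is value-indistinguishable.
def pvMinD (l : List Int) : Int := (l.min?).getD 0

def pvLoopA (fuel : Nat) (K : Int) (l : List Int) (count : Int) : Int :=
  match fuel with
  | 0 => count                              -- unreachable: the loop runs at most l.length - 1 times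
  | f + 1 =>
    if pvMinD l < K then                    -- while scoville[0] < K
      let a := pvMinD l                     -- heappop
      let l1 := l.erase a
      let b := pvMinD l1                    -- heappop
      let l2 := l1.erase b
      let l3 := l2 ++ [a + b * 2]           -- heappush(mixScoville)
      if l3.length = 1 ∧ pvMinD l3 < K then -1
      else pvLoopA f K l3 (count + 1)
    else count

def solution (scoville : List Int) (K : Int) : Int :=
  pvLoopA scoville.length K scoville 0

-- ===== PORT B =====
-- insert mixed just after the last element ≤ it (B's inner scan-and-insert loop)
def pvInsort (x : Int) : List Int → List Int
  | [] => [x]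
  | y :: ys => if x < y then x :: y :: ys else y :: pvInsort x ys

def pvLoopB (fuel : Nat) (K : Int) (s : List Int) (count : Int) : List Int × Int :=
  match fuel, s with
  | f + 1, a :: b :: rest =>
    if a < K then pvLoopB f K (pvInsort (a + b * 2) rest) (count + 1)
    else (a :: b :: rest, count)
  | _, s => (s, count)                      -- while condition len > 1 fails (or fuel exhausted)

def solution_alt (scoville : List Int) (K : Int) : Int :=
  let s := PySem.List.sorted scoville (fun x => x) false
  let r := pvLoopB s.length K s 0
  if r.1.headD 0 ≥ K then r.2 else -1

-- ===== PRECONDITION & SPEC =====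
-- Pre_ excludes exactly the inputs where A raises IndexError: the empty list (scoville[0]) and a
-- single element still below K (the second heappop pops from an empty heap).
def Pre_solution (scoville : List Int) (K : Int) : Prop :=
  scoville ≠ [] ∧ (scoville.length = 1 → K ≤ scoville.headD 0)
instance (scoville : List Int) (K : Int) : Decidable (Pre_solution scoville K) := by unfold Pre_solution; infer_instance
def pvWitness_solution : List Int × Int := ([1, 2, 3], 7)

def Spec_solution (scoville : List Int) (K : Int) (out : Int) : Prop := out = solution_alt scoville K
instance (scoville : List Int) (K : Int) (out : Int) : Decidable (Spec_solution scoville K out) := by unfold Spec_solution; infer_instance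

-- ===== CLAIM (what is proved, stated in full; the proofs are below) =====
def Claim_equal_solution : Prop := ∀ (scoville : List Int) (K : Int), Dom_solution scoville K → Pre_solution scoville K → Spec_solution scoville K (solution scoville K)

-- ===== LEMMAS AND PROOFS =====

lemma min?_perm (l s : List Int) (h : l.Perm s) : l.min? = s.min? := by
  match hs : s.min? with
  | none =>
    have hse : s = [] := by simpa using hs
    subst hse
    simpa using h.eq_nil
  | some m =>
    rw [List.min?_eq_some_iff] at hs ⊢
    exact ⟨h.mem_iff.mpr hs.1, fun b hb => hs.2 b (h.mem_iff.mp hb)⟩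

lemma minD_perm (l s : List Int) (h : l.Perm s) : pvMinD l = pvMinD s := by
  unfold pvMinD; rw [min?_perm l s h]

lemma minD_sorted_cons (a : Int) (t : List Int) (h : (a :: t).Pairwise (· ≤ ·)) :
    pvMinD (a :: t) = a := by
  unfold pvMinD
  have : (a :: t).min? = some a := by
    rw [List.min?_eq_some_iff]
    refine ⟨List.mem_cons_self, ?_⟩
    intro b hb
    rcases List.mem_cons.mp hb with hb | hb
    · simp [hb]
    · exact (List.pairwise_cons.mp h).1 b hb
  simp [this]

lemma insort_perm (x : Int) (s : List Int) : (pvInsort x s).Perm (x :: s) := by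
  induction s with
  | nil => simp [pvInsort]
  | cons y ys ih =>
    unfold pvInsort
    split
    · exact List.Perm.refl _
    · exact (ih.cons y).trans (List.Perm.swap x y ys)

lemma insort_pairwise (x : Int) (s : List Int) (h : s.Pairwise (· ≤ ·)) :
    (pvInsort x s).Pairwise (· ≤ ·) := by
  induction s with
  | nil => simp [pvInsort]
  | cons y ys ih =>
    rw [List.pairwise_cons] at h
    unfold pvInsort
    split
    · rename_i hlt
      rw [List.pairwise_cons]
      constructor
      · intro b hb
        rcases List.mem_cons.mp hb with hb | hb
        · omega
        · have := h.1 b hb; omega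
      · exact List.pairwise_cons.mpr h
    · rename_i hnlt
      rw [List.pairwise_cons]
      refine ⟨?_, ih h.2⟩
      intro b hb
      have hb' := (insort_perm x ys).mem_iff.mp hb
      rcases List.mem_cons.mp hb' with rfl | hb'
      · omega
      · exact h.1 b hb'

lemma length_insort (x : Int) (s : List Int) : (pvInsort x s).length = s.length + 1 :=
  (insort_perm x s).length_eq

lemma loop_eq (fuel : Nat) : ∀ (l s : List Int) (K c : Int),
    l.Perm s → s.Pairwise (· ≤ ·) → fuel = s.length → s ≠ [] →
    (s.length = 1 → K ≤ s.headD 0) →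
    pvLoopA fuel K l c =
      (if (pvLoopB fuel K s c).1.headD 0 ≥ K then (pvLoopB fuel K s c).2 else -1) := by
  induction fuel with
  | zero =>
    intro l s K c hp hs hf hne h1
    exact absurd (List.length_eq_zero_iff.mp hf.symm) hne
  | succ f ih =>
    intro l s K c hp hs hf hne h1
    match s with
    | [a] =>
      have hKa : K ≤ a := by simpa using h1
      have hminl : pvMinD l = a := by
        rw [minD_perm l [a] hp, minD_sorted_cons a [] (by simp)]
      simp only [pvLoopA, pvLoopB, hminl]
      rw [if_neg (by omega)]
      simp [hKa]
    | a :: b :: rest =>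
      have hminl : pvMinD l = a := minD_perm l _ hp ▸ minD_sorted_cons a (b :: rest) hs
      by_cases ha : a < K
      · -- one mixing step
        have hab : a ≤ b := (List.pairwise_cons.mp hs).1 b (by simp)
        have hl1 : (l.erase a).Perm (b :: rest) := by
          have := hp.erase a
          simpa using this
        have hsbr : (b :: rest).Pairwise (· ≤ ·) := (List.pairwise_cons.mp hs).2
        have hminl1 : pvMinD (l.erase a) = b :=
          minD_perm _ _ hl1 ▸ minD_sorted_cons b rest hsbr
        have hl2 : ((l.erase a).erase b).Perm rest := by
          have := hl1.erase b
          simpa using this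
        have hl3 : (((l.erase a).erase b) ++ [a + b * 2]).Perm (pvInsort (a + b * 2) rest) :=
          ((List.perm_append_singleton (a + b * 2) _).trans (hl2.cons (a + b * 2))).trans
            (insort_perm (a + b * 2) rest).symm
        have hs' : (pvInsort (a + b * 2) rest).Pairwise (· ≤ ·) :=
          insort_pairwise (a + b * 2) rest (List.pairwise_cons.mp hsbr).2
        have hlen' : (pvInsort (a + b * 2) rest).length = rest.length + 1 := length_insort (a + b * 2) rest
        have hf' : f = (pvInsort (a + b * 2) rest).length := by
          simp at hf; omega
        have hne' : pvInsort (a + b * 2) rest ≠ [] := by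
          intro hnil; rw [hnil] at hlen'; simp at hlen'
        have hminl3 : pvMinD (((l.erase a).erase b) ++ [a + b * 2]) = pvMinD (pvInsort (a + b * 2) rest) :=
          minD_perm _ _ hl3
        have hlenl3 : (((l.erase a).erase b) ++ [a + b * 2]).length = (pvInsort (a + b * 2) rest).length :=
          hl3.length_eq
        have hhead : ∀ x xs, pvInsort (a + b * 2) rest = x :: xs → pvMinD (pvInsort (a + b * 2) rest) = x := by
          intro x xs hx
          rw [hx]; exact minD_sorted_cons x xs (hx ▸ hs')
        simp only [pvLoopA, pvLoopB, hminl, hminl1, if_pos ha]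
        rw [hlenl3, hminl3]
        by_cases hc : (pvInsort (a + b * 2) rest).length = 1 ∧ pvMinD (pvInsort (a + b * 2) rest) < K
        · rw [if_pos hc]
          obtain ⟨x, hx⟩ := List.length_eq_one_iff.mp hc.1
          have hxm : pvMinD (pvInsort (a + b * 2) rest) = x := hhead x [] hx
          have hf1 : f = 1 := by omega
          rw [hf1, hx]
          simp only [pvLoopB]
          rw [if_neg (by rw [hxm] at hc; simpa using hc.2)]
        · rw [if_neg hc]
          apply ih _ _ _ _ hl3 hs' hf' hne'
          intro hlen1
          obtain ⟨x, hx⟩ := List.length_eq_one_iff.mp hlen1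
          have hxm : pvMinD (pvInsort (a + b * 2) rest) = x := hhead x [] hx
          rw [hx]
          simp only [List.headD_cons]
          by_contra hKx
          exact hc ⟨hlen1, by rw [hxm]; omega⟩
      · simp only [pvLoopA, pvLoopB, hminl, if_neg ha]
        simp
        omega

-- ===== VERDICT (by name: the statement is the Claim_ definition above) =====
theorem solution_spec : Claim_equal_solution := by
  intro scoville K hDom hPre
  unfold Spec_solution solution solution_alt
  obtain ⟨hne, h1⟩ := hPre
  have hperm : scoville.Perm (PySem.List.sorted scoville (fun x => x) false) :=
    (PySem.List.sorted_perm scoville (fun x => x) false).symm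
  have hpair : (PySem.List.sorted scoville (fun x => x) false).Pairwise (· ≤ ·) := by
    have := PySem.List.sorted_pairwise (xs := scoville) (key := fun x => x)
    simpa using this
  have hlen : scoville.length = (PySem.List.sorted scoville (fun x => x) false).length :=
    hperm.length_eq
  have hne' : PySem.List.sorted scoville (fun x => x) false ≠ [] := by
    simpa [PySem.List.sorted_eq_nil_iff] using hne
  have h1' : (PySem.List.sorted scoville (fun x => x) false).length = 1 →
      K ≤ (PySem.List.sorted scoville (fun x => x) false).headD 0 := by
    intro hl1
    have hl1' : scoville.length = 1 := by omega
    obtain ⟨x, hx⟩ := List.length_eq_one_iff.mp hl1'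
    have hsx : PySem.List.sorted scoville (fun x => x) false = [x] := by
      rw [hx]
      exact PySem.List.sorted_eq_self_of_pairwise [x] (fun x => x) (List.pairwise_singleton _ _)
    rw [hsx]
    have := h1 hl1'
    rw [hx] at this
    simpa using this
  have := loop_eq scoville.length scoville
      (PySem.List.sorted scoville (fun x => x) false) K 0 hperm hpair hlen hne' h1'
  rw [hlen] at this ⊢
  exact this
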